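-- pv_equiv track=rewrite | github.com/vicky22291/VinayPractise | problem_solving/arrays_and_strings/generate_sentences.py | generateSentences
-- ===== SOURCE A (Python) =====
-- import collections
-- from typing import List
--
-- def generateSentences(synonyms: List[List[str]], text: str) -> List[str]:
--     finalData = collections.defaultdict(set)
--     for key, value in synonyms:
--         finalData[key] = finalData[value] = finalData[key].union(finalData[value])
--         finalData[key].add(value)
--         finalData[key].add(key)
--         for word in finalData[key]:
--             if word != key:
--                 finalData[word] = finalData[key]
--     sentence = text.split(' ')
--     result = []
--
--     def traverse(index, words, result):
--         if index == len(words):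
--             result.append(words)
--         else:
--             traverse(index + 1, words, result)
--             if words[index] in finalData:
--                 for alternate in finalData[words[index]]:
--                     if alternate != words[index]:
--                         newWords = [word for word in words]
--                         newWords[index] = alternate
--                         traverse(index + 1, newWords, result)
--
--     traverse(0, sentence, result)
--     ans = [" ".join(words) for words in result]
--     return sorted(ans)
-- ===== SOURCE B (Python) =====
-- import collections
--
--
-- def generateSentences(synonyms, text):
--     finalData = collections.defaultdict(set)
--     for key, value in synonyms:
--         finalData[key] = finalData[value] = finalData[key].union(finalData[value])
--         finalData[key].add(value)
--         finalData[key].add(key)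
--         for word in finalData[key]:
--             if word != key:
--                 finalData[word] = finalData[key]
--     combos = [[]]
--     for w in text.split(' '):
--         opts = list(finalData[w]) if w in finalData else [w]
--         combos = [c + [x] for c in combos for x in opts]
--     return sorted(' '.join(c) for c in combos)
-- ===== Notes on version B (the rewrite author's own statement) =====
-- stated objective: idiomatic
-- what changed: The recursive traverse enumeration with per-index list copying is replaced by a flat iterative cartesian product over per-word option lists; the synonym-group building loop is kept.
import Mathlib
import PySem

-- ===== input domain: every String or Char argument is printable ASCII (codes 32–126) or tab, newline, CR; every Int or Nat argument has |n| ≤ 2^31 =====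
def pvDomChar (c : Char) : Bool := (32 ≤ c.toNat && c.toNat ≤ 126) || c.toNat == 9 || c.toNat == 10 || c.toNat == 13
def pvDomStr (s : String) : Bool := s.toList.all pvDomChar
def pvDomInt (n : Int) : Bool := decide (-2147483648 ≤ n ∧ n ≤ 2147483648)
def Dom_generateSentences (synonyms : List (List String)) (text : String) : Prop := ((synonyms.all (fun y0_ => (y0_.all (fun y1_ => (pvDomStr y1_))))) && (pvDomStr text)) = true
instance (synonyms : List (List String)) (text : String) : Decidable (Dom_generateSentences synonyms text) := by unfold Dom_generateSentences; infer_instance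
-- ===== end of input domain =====

-- B replaces A's recursive `traverse` enumeration by a flat iterative cartesian-product fold
-- over per-word option lists (objective: idiomatic); the synonym-group loop is identical in
-- Source A and Source B, so both ports share `buildFinalData`.

-- ===== PORT A =====
-- The synonym-group loop. Python's set-object aliasing (`finalData[word] = finalData[key]`)
-- never crosses an iteration: each iteration builds a fresh set object and re-points key,
-- value and every member of the new set at it, so inserting the finished set at all those
-- keys is exact. A row of length ≠ 2 raises ValueError in Python (excluded by Pre_); the
-- `| _ => d` branch is only a totality guard.
def buildFinalData (synonyms : List (List String)) : PySem.Dict String (PySem.Set String) :=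
  synonyms.foldl (fun d pair =>
    match pair with
    | [key, value] =>
      let s0 := PySem.Set.union (d.getD key PySem.Set.empty) (d.getD value PySem.Set.empty)
      let s := PySem.Set.add (PySem.Set.add s0 value) key
      let d := (d.insert key s).insert value s
      s.foldl (fun d word => if word ≠ key then d.insert word s else d) d
    | _ => d)
    PySem.Dict.empty

def traverseA (fd : PySem.Dict String (PySem.Set String)) (index : Nat) (words : List String)
    (result : List (List String)) : List (List String) :=
  if index = words.length then
    result ++ [words]
  else
    match hw : words[index]? with
    | none => result   -- Python's words[index] would raise IndexError; unreachable from index = 0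
    | some w =>
      let result := traverseA fd (index + 1) words result
      match fd.get? w with
      | some s =>
          s.foldl (fun r alternate =>
            if alternate ≠ w then traverseA fd (index + 1) (words.set index alternate) r else r)
            result
      | none => result
termination_by words.length - index
decreasing_by
  · obtain ⟨h, -⟩ := List.getElem?_eq_some_iff.mp hw
    omega
  · obtain ⟨h, -⟩ := List.getElem?_eq_some_iff.mp hw
    simp only [List.length_set]
    omega

def generateSentences (synonyms : List (List String)) (text : String) : List String :=
  let finalData := buildFinalData synonyms
  let sentence := (PySem.Str.split? text " ").getD []   -- separator ≠ "", so split? is always `some`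
  let result := traverseA finalData 0 sentence []
  let ans := result.map (fun ws => PySem.Str.join " " ws)
  PySem.List.sorted ans (fun x => x)

-- ===== PORT B =====
def generateSentences_alt (synonyms : List (List String)) (text : String) : List String :=
  let finalData := buildFinalData synonyms
  let combos := ((PySem.Str.split? text " ").getD []).foldl
    (fun acc w =>
      let opts : List String := match finalData.get? w with | some s => s | none => [w]
      acc.flatMap (fun c => opts.map (fun x => c ++ [x])))
    [[]]
  PySem.List.sorted (combos.map (fun c => PySem.Str.join " " c)) (fun x => x)

-- ===== PRECONDITION & SPEC =====
-- A raises ValueError when unpacking a synonyms row whose length is not 2; so does B.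
def Pre_generateSentences (synonyms : List (List String)) (text : String) : Prop :=
  ∀ p ∈ synonyms, p.length = 2
instance (synonyms : List (List String)) (text : String) : Decidable (Pre_generateSentences synonyms text) := by unfold Pre_generateSentences; infer_instance

def pvWitness_generateSentences : List (List String) × String := ([["happy", "glad"]], "I am happy today")

def Spec_generateSentences (synonyms : List (List String)) (text : String) (out : List String) : Prop := out = generateSentences_alt synonyms text
instance (synonyms : List (List String)) (text : String) (out : List String) : Decidable (Spec_generateSentences synonyms text out) := by unfold Spec_generateSentences; infer_instance

-- ===== CLAIM (what is proved, stated in full; the proofs are below) =====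
def Claim_equal_generateSentences : Prop := ∀ (synonyms : List (List String)) (text : String), Dom_generateSentences synonyms text → Pre_generateSentences synonyms text → Spec_generateSentences synonyms text (generateSentences synonyms text)

-- ===== LEMMAS AND PROOFS =====

lemma get?_foldl_insert_mem (key : String) (s : PySem.Set String) :
    ∀ (l : List String) (d : PySem.Dict String (PySem.Set String)) (k : String)
      (t : PySem.Set String),
      (l.foldl (fun d w => if w ≠ key then d.insert w s else d) d).get? k = some t →
      (t = s ∧ k ∈ l) ∨ d.get? k = some t := by
  intro l
  induction l with
  | nil => intro d k t h; exact Or.inr h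
  | cons w l ih =>
    intro d k t h
    simp only [List.foldl_cons] at h
    rcases ih _ k t h with ⟨rfl, hk⟩ | hd
    · exact Or.inl ⟨rfl, List.mem_cons_of_mem _ hk⟩
    · by_cases hw : w ≠ key
      · rw [if_pos hw, PySem.Dict.get?_insert] at hd
        by_cases hkw : k = w
        · subst hkw; simp at hd; exact Or.inl ⟨hd.symm, List.mem_cons_self⟩
        · simp [hkw] at hd; exact Or.inr hd
      · rw [if_neg hw] at hd; exact Or.inr hd

-- the cartesian product of a list of option lists, leftmost index most significant
def prodL : List (List String) → List (List String)
  | [] => [[]]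
  | o :: os => o.flatMap (fun x => (prodL os).map (fun t => x :: t))

-- the option list position `w` effectively ranges over in A's traverse
def optsA (fd : PySem.Dict String (PySem.Set String)) (w : String) : List String :=
  match fd.get? w with
  | some s => w :: s.filter (fun a => a != w)
  | none => [w]

-- the option list position `w` ranges over in B
def optsB (fd : PySem.Dict String (PySem.Set String)) (w : String) : List String :=
  match fd.get? w with
  | some s => s
  | none => [w]

lemma getD_nodup (d : PySem.Dict String (PySem.Set String))
    (hd : ∀ k s, d.get? k = some s → k ∈ s ∧ s.Nodup) (k : String) :
    (d.getD k PySem.Set.empty).Nodup := by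
  rw [PySem.Dict.getD_eq_get?_getD]
  cases h : d.get? k with
  | none => simp [PySem.Set.empty]
  | some u => exact (hd k u h).2

lemma inv_fold :
    ∀ (rows : List (List String)) (d : PySem.Dict String (PySem.Set String)),
      (∀ k s, d.get? k = some s → k ∈ s ∧ s.Nodup) →
      ∀ k s, (rows.foldl (fun d pair =>
        match pair with
        | [key, value] =>
          let s0 := PySem.Set.union (d.getD key PySem.Set.empty) (d.getD value PySem.Set.empty)
          let s := PySem.Set.add (PySem.Set.add s0 value) key
          let d := (d.insert key s).insert value s
          s.foldl (fun d word => if word ≠ key then d.insert word s else d) d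
        | _ => d) d).get? k = some s → k ∈ s ∧ s.Nodup := by
  intro rows
  induction rows with
  | nil => intro d hd k s h; exact hd k s h
  | cons row rows ih =>
    intro d hd k s h
    simp only [List.foldl_cons] at h
    refine ih _ ?_ k s h
    match row with
    | [] => exact hd
    | [x] => exact hd
    | x :: y :: z :: r => exact hd
    | [key, value] =>
      intro k' s' h'
      simp only at h'
      set S := PySem.Set.add (PySem.Set.add (PySem.Set.union (d.getD key PySem.Set.empty) (d.getD value PySem.Set.empty)) value) key with hS
      have hSnodup : S.Nodup := by
        apply PySem.Set.nodup_add
        apply PySem.Set.nodup_add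
        apply PySem.Set.nodup_union
        exact getD_nodup d hd key
      have hkeyS : key ∈ S := by rw [hS, PySem.Set.mem_add]; right; rfl
      have hvalS : value ∈ S := by
        rw [hS, PySem.Set.mem_add]; left; rw [PySem.Set.mem_add]; right; rfl
      rcases get?_foldl_insert_mem key S S ((d.insert key S).insert value S) k' s' h' with ⟨rfl, hk⟩ | hd2
      · exact ⟨hk, hSnodup⟩
      · rw [PySem.Dict.get?_insert] at hd2
        by_cases hkv : k' = value
        · simp [hkv] at hd2; subst hd2; exact ⟨hkv ▸ hvalS, hSnodup⟩
        · rw [if_neg hkv, PySem.Dict.get?_insert] at hd2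
          by_cases hkk : k' = key
          · simp [hkk] at hd2; subst hd2; exact ⟨hkk ▸ hkeyS, hSnodup⟩
          · rw [if_neg hkk] at hd2; exact hd k' s' hd2

lemma buildFinalData_inv (synonyms : List (List String)) (k : String) (s : PySem.Set String)
    (h : (buildFinalData synonyms).get? k = some s) : k ∈ s ∧ s.Nodup := by
  refine inv_fold synonyms PySem.Dict.empty ?_ k s h
  intro k s h
  rw [PySem.Dict.get?_empty] at h
  exact absurd h (by simp)

lemma opts_perm (synonyms : List (List String)) (w : String) :
    (optsA (buildFinalData synonyms) w).Perm (optsB (buildFinalData synonyms) w) := by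
  unfold optsA optsB
  cases h : (buildFinalData synonyms).get? w with
  | none => rfl
  | some s =>
    obtain ⟨hmem, hnd⟩ := buildFinalData_inv synonyms w s h
    simp only [(List.Nodup.erase_eq_filter hnd w).symm]
    exact (List.perm_cons_erase hmem).symm

lemma prodL_perm : ∀ (os1 os2 : List (List String)), List.Forall₂ List.Perm os1 os2 →
    (prodL os1).Perm (prodL os2) := by
  intro os1 os2 h
  induction h with
  | nil => rfl
  | cons h1 _ ih =>
    exact List.Perm.flatMap h1 (fun a _ => List.Perm.map _ ih)

lemma foldl_prod (fd : PySem.Dict String (PySem.Set String)) :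
    ∀ (ws : List String) (A : List (List String)),
      ws.foldl (fun acc w => acc.flatMap (fun c => (optsB fd w).map (fun x => c ++ [x]))) A
        = A.flatMap (fun c => (prodL (ws.map (optsB fd))).map (fun t => c ++ t)) := by
  intro ws
  induction ws with
  | nil => intro A; simp [prodL]
  | cons w ws ih =>
    intro A
    simp only [List.foldl_cons, ih, List.map_cons, prodL]
    simp [List.flatMap_assoc, List.map_flatMap, List.flatMap_map, Function.comp_def]

set_option maxRecDepth 4096 in
lemma traverseA_eq (fd : PySem.Dict String (PySem.Set String)) :
    ∀ (n : Nat) (words : List String) (k : Nat) (acc : List (List String)),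
      words.length - k = n → k ≤ words.length →
      traverseA fd k words acc
        = acc ++ (prodL ((words.drop k).map (optsA fd))).map (fun t => words.take k ++ t) := by
  intro n
  induction n with
  | zero =>
    intro words k acc hn hk
    have hkl : k = words.length := by omega
    subst hkl
    rw [traverseA]
    simp [prodL]
  | succ n ih =>
    intro words k acc hn hk
    have hklt : k < words.length := by omega
    have htake : words.take (k + 1) = words.take k ++ [words[k]] :=
      List.take_succ_eq_append_getElem hklt
    have hdrop : words.drop k = words[k] :: words.drop (k + 1) :=
      List.drop_eq_getElem_cons hklt
    rw [traverseA, if_neg (by omega)]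
    have hR1 : traverseA fd (k + 1) words acc
        = acc ++ (prodL ((words.drop (k + 1)).map (optsA fd))).map
            (fun t => words.take (k + 1) ++ t) :=
      ih words (k + 1) acc (by omega) (by omega)
    split
    case _ hw => exact absurd hw (by simp [List.getElem?_eq_getElem hklt])
    case _ w hw =>
    have hwk : w = words[k] := by
      have := List.getElem?_eq_getElem hklt
      rw [this] at hw; exact (Option.some_inj.mp hw).symm
    subst hwk
    cases hget : fd.get? words[k] with
    | none =>
      simp only [hR1, hdrop, List.map_cons, optsA, hget, prodL]
      simp only [List.flatMap_cons, List.flatMap_nil, List.append_nil, List.map_map,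
        Function.comp_def, htake, List.append_assoc, List.singleton_append]
    | some s =>
      have hlen : (words.take k).length = k := by simp [List.length_take]; omega
      have hset : ∀ a : String, (words.set k a).take (k + 1) = words.take k ++ [a] := by
        intro a
        have h1 : words.set k a = words.take k ++ a :: words.drop (k + 1) := by
          rw [List.set_eq_take_append_cons_drop, if_pos hklt]
        rw [h1, List.take_append, List.take_of_length_le (by omega), hlen]
        simp
      have hstep : ∀ (a : String), a ∈ (s : List String) → ∀ (r : List (List String)),
          (if a ≠ words[k] then traverseA fd (k + 1) (words.set k a) r else r)
            = (if a ≠ words[k] then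
                r ++ (prodL ((words.drop (k + 1)).map (optsA fd))).map
                  (fun t => words.take k ++ a :: t) else r) := by
        intro a _ r
        by_cases ha : a ≠ words[k]
        · rw [if_pos ha, if_pos ha,
            ih (words.set k a) (k + 1) r (by simp [List.length_set]; omega)
              (by simp [List.length_set]; omega)]
          rw [List.drop_set]
          simp [hset a]
        · rw [if_neg ha, if_neg ha]
      simp only [hR1]
      refine (PySem.List.foldl_congr_mem' _ _
        (fun r a => if a ≠ words[k] then
            r ++ (prodL ((words.drop (k + 1)).map (optsA fd))).map
              (fun t => words.take k ++ a :: t) else r) _ hstep).trans ?_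
      rw [PySem.List.foldl_ite_eq_foldl_filter]
      rw [PySem.List.foldl_append_eq_flatMap]
      simp only [optsA, hget, hdrop, List.map_cons, prodL, List.flatMap_cons]
      simp only [htake, List.map_append, List.map_map, List.map_flatMap, Function.comp_def,
        List.append_assoc, List.singleton_append, ne_eq, bne, beq_eq_decide, decide_not]


-- ===== VERDICT (by name: the statement is the Claim_ definition above) =====
theorem generateSentences_spec : Claim_equal_generateSentences := by
  intro synonyms text _ _
  unfold Spec_generateSentences generateSentences generateSentences_alt
  show PySem.List.sorted
      ((traverseA (buildFinalData synonyms) 0 ((PySem.Str.split? text " ").getD []) []).map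
        (fun ws => PySem.Str.join " " ws)) (fun x => x)
    = PySem.List.sorted
      ((((PySem.Str.split? text " ").getD []).foldl
          (fun acc w => acc.flatMap (fun c => (optsB (buildFinalData synonyms) w).map
            (fun x => c ++ [x]))) [[]]).map (fun c => PySem.Str.join " " c)) (fun x => x)
  have hA := traverseA_eq (buildFinalData synonyms)
    (((PySem.Str.split? text " ").getD []).length) ((PySem.Str.split? text " ").getD []) 0 []
    (by omega) (by omega)
  rw [hA, foldl_prod]
  simp only [List.drop_zero, List.take_zero, List.nil_append, List.flatMap_cons,
    List.flatMap_nil, List.append_nil, List.map_id']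
  have hperm : ∀ (l : List String),
      List.Forall₂ List.Perm (l.map (optsA (buildFinalData synonyms)))
        (l.map (optsB (buildFinalData synonyms))) := by
    intro l
    induction l with
    | nil => exact List.Forall₂.nil
    | cons w l ih => exact List.Forall₂.cons (opts_perm synonyms w) ih
  apply PySem.List.sorted_eq_sorted_of_perm _ _ _ (fun a b h => h)
  exact List.Perm.map _ (prodL_perm _ _ (hperm _))
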